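-- pv_equiv track=rewrite | github.com/LeYangNwpu/CodeCraft | z_interview_questions/save_universe.py | cal_hack
-- ===== SOURCE A (Python) =====
-- def cal_hack(order):
-- 	num = 0
-- 	length = 1
-- 	for cha in order:
-- 		if cha == 'C':
-- 			length *= 2
-- 		else:
-- 			num += length
-- 	return num
-- ===== SOURCE B (Python) =====
-- def cal_hack(order):
--     num = 0
--     for cha in order[::-1]:
--         if cha == 'C':
--             num *= 2
--         else:
--             num += 1
--     return num
-- ===== Notes on version B (the rewrite author's own statement) =====
-- stated objective: simpler
-- what changed: Replaces the two-accumulator scan (num plus a doubling length) with a single-accumulator Horner-style fold over the reversed string: double on 'C', add 1 otherwise.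
import Mathlib
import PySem

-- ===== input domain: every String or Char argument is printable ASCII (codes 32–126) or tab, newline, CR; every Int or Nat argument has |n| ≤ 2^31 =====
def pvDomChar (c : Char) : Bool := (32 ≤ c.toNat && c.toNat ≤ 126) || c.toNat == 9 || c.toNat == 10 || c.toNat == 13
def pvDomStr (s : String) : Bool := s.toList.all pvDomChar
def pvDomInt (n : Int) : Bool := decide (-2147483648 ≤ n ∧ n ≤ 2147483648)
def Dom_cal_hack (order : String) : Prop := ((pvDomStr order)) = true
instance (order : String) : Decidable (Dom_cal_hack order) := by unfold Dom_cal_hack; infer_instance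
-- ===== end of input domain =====

-- B replaces A's two-accumulator scan (num + doubling length) by a one-accumulator
-- Horner fold over the reversed string; objective: simpler.

-- ===== PORT A =====
def cal_hack (order : String) : Int :=
  (order.toList.foldl
    (fun (st : Int × Int) cha =>
      if cha = 'C' then (st.1, st.2 * 2) else (st.1 + st.2, st.2))
    (0, 1)).1

-- ===== PORT B =====
def cal_hack_alt (order : String) : Int :=
  order.toList.reverse.foldl
    (fun (num : Int) cha => if cha = 'C' then num * 2 else num + 1) 0

-- ===== PRECONDITION & SPEC =====
def Spec_cal_hack (order : String) (out : Int) : Prop := out = cal_hack_alt order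
instance (order : String) (out : Int) : Decidable (Spec_cal_hack order out) := by unfold Spec_cal_hack; infer_instance

-- ===== CLAIM (what is proved, stated in full; the proofs are below) =====
def Claim_equal_cal_hack : Prop := ∀ (order : String), Dom_cal_hack order → Spec_cal_hack order (cal_hack order)

-- ===== LEMMAS AND PROOFS =====
theorem cal_hack_key (l : List Char) (n len : Int) :
    (l.foldl (fun (st : Int × Int) cha =>
      if cha = 'C' then (st.1, st.2 * 2) else (st.1 + st.2, st.2)) (n, len)).1
    = n + len * l.foldr (fun cha num => if cha = 'C' then num * 2 else num + 1) 0 := by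
  induction l generalizing n len with
  | nil => simp
  | cons c t ih =>
    simp only [List.foldl_cons, List.foldr_cons]
    split_ifs with h <;> simp [ih] <;> ring

-- ===== VERDICT (by name: the statement is the Claim_ definition above) =====
theorem cal_hack_spec : Claim_equal_cal_hack := by
  intro order _
  unfold Spec_cal_hack cal_hack cal_hack_alt
  rw [List.foldl_reverse, cal_hack_key]
  ring
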